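-- pv_equiv track=rewrite | github.com/minyez/mykit | mykit/vasp/utils.py | get_npar
-- ===== SOURCE A (Python) =====
-- from math import sqrt
--
-- def get_npar(nproc):
--     """get NPAR parameter from number of processors
--     """
--     npar = 1
--     nsqrt = int(sqrt(nproc)) + 1
--     while nsqrt > 0:
--         if nsqrt % 2 == 0 and nproc % nsqrt == 0:
--             npar = nsqrt
--             break
--         nsqrt -= 1
--     return npar
-- ===== SOURCE B (Python) =====
-- from math import sqrt
--
-- def get_npar(nproc):
--     """get NPAR parameter from number of processors
--     """
--     nsqrt = int(sqrt(nproc)) + 1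
--     candidates = [i for i in range(2, nsqrt + 1, 2) if nproc % i == 0]
--     return max(candidates) if candidates else 1
-- ===== Notes on version B (the rewrite author's own statement) =====
-- stated objective: simpler
-- what changed: Replaces the descending while-loop with an early break by a single ascending collect of the even divisors up to int(sqrt(nproc))+1 followed by max (collect-then-reduce instead of find-first-descending), with no parity test in the loop since the stride-2 range yields only even candidates.
import Mathlib
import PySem

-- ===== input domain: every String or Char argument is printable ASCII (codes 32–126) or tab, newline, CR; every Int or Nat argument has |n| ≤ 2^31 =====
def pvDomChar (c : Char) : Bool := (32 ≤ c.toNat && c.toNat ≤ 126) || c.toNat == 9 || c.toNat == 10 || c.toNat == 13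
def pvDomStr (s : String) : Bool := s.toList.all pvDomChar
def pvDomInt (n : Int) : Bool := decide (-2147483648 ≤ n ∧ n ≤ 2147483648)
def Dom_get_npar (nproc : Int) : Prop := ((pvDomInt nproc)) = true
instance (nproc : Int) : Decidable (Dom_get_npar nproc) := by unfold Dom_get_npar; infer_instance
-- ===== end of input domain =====

-- B replaces A's descending scan-with-break by collecting the even divisors ascending and taking their max (simpler decomposition; same cost).

-- ===== PORT A =====
-- 'int(sqrt(nproc))' is exact as Nat.sqrt on the domain 0 ≤ nproc ≤ 2^31 (double sqrt is
-- correctly rounded and the distance to the nearest square far exceeds an ulp there);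
-- negative nproc makes math.sqrt raise ValueError, excluded by Pre_.
-- The while-loop ('decrement nsqrt, break on the first even divisor') as descending recursion:
def getNparLoopA (nproc : Int) : Nat → Int
  | 0 => 1
  | k + 1 =>
      if PySem.Int.mod ((k : Int) + 1) 2 == 0 && PySem.Int.mod nproc ((k : Int) + 1) == 0 then
        (k : Int) + 1
      else
        getNparLoopA nproc k

def get_npar (nproc : Int) : Int :=
  getNparLoopA nproc (Nat.sqrt nproc.toNat + 1)

-- ===== PORT B =====
def get_npar_alt (nproc : Int) : Int :=
  let nsqrt : Int := (Nat.sqrt nproc.toNat : Int) + 1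
  let candidates := (PySem.List.pyRange 2 (nsqrt + 1) 2).filter (fun i => PySem.Int.mod nproc i == 0)
  match PySem.List.max? candidates (fun x => x) with
  | some m => m
  | none => 1

-- ===== PRECONDITION & SPEC =====
-- Pre_ excludes negative nproc, on which math.sqrt raises ValueError in both A and B.
def Pre_get_npar (nproc : Int) : Prop := 0 ≤ nproc
instance (nproc : Int) : Decidable (Pre_get_npar nproc) := by unfold Pre_get_npar; infer_instance
def pvWitness_get_npar : Int := (12)

def Spec_get_npar (nproc : Int) (out : Int) : Prop := out = get_npar_alt nproc
instance (nproc : Int) (out : Int) : Decidable (Spec_get_npar nproc out) := by unfold Spec_get_npar; infer_instance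

-- ===== CLAIM (what is proved, stated in full; the proofs are below) =====
def Claim_equal_get_npar : Prop := ∀ (nproc : Int), Dom_get_npar nproc → Pre_get_npar nproc → Spec_get_npar nproc (get_npar nproc)

-- ===== LEMMAS AND PROOFS =====

-- the even integers 2, 4, …, up to k (proof-side helper)
def evensTo (k : Nat) : List Int := (List.range (k / 2)).map (fun j : Nat => 2 * (j : Int) + 2)

-- range(2, k+2, 2) is the list of even integers 2, 4, …, ≤ k+1, i.e. 2j+2 for j < (k+1)/2.
theorem pyRange_two_even (k : Nat) :
    PySem.List.pyRange 2 ((k : Int) + 1) 2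
      = evensTo k := by
  rw [PySem.List.pyRange_of_pos _ _ (by norm_num)]
  have hc : (if (2 : Int) < (k : Int) + 1 then (((k : Int) + 1 - 2 + 2 - 1) / 2).toNat else 0) = k / 2 := by
    split_ifs with h
    · have h2 : ((k : Int) + 1 - 2 + 2 - 1) = (k : Int) := by ring
      rw [h2]; omega
    · omega
  rw [hc]
  unfold evensTo
  exact List.map_congr_left (fun j _ => by push_cast; ring)

theorem max?_append_singleton (F : List Int) (x : Int) (h : ∀ y ∈ F, y ≤ x) :
    PySem.List.max? (F ++ [x]) (fun y => y) = some x := by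
  cases F with
  | nil => simp [PySem.List.max?_id_cons]
  | cons a t =>
      rw [List.cons_append, PySem.List.max?_id_cons, List.foldl_append]
      have hle : List.foldl max a t ≤ x := by
        rcases PySem.List.foldl_max_mem t a with hm | hm
        · rw [hm]; exact h a (by simp)
        · exact h _ (by simp [hm])
      simp [max_eq_right hle]

-- A's descending first-hit loop equals B's collect-then-max over the even list.
theorem loop_eq_collect (n : Int) (k : Nat) :
    getNparLoopA n k
      = (match PySem.List.max?
            ((evensTo k).filter
              (fun i => PySem.Int.mod n i == 0)) (fun x => x) with
         | some m => m
         | none => 1) := by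
  induction k with
  | zero => simp [getNparLoopA, evensTo, PySem.List.max?]
  | succ k ih =>
    have hbound : ∀ y ∈ (evensTo k).filter
        (fun i => PySem.Int.mod n i == 0), y ≤ (k : Int) + 1 := by
      intro y hy
      have hy' := List.mem_of_mem_filter hy
      rcases List.mem_map.mp hy' with ⟨j, hj, rfl⟩
      rcases List.mem_range.mp hj with hjk
      have : j < k / 2 := hjk
      omega
    by_cases hpar : (k + 1) % 2 = 0
    · -- k+1 even: the range gains the element k+1
      have hdiv : (k + 1) / 2 = k / 2 + 1 := by omega
      have hmod2 : PySem.Int.mod ((k : Int) + 1) 2 = 0 := by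
        rw [PySem.Int.mod_eq_emod_of_pos (by norm_num)]; omega
      have hrange : evensTo (k + 1)
          = evensTo k ++ [(k : Int) + 1] := by
        unfold evensTo
        rw [hdiv, List.range_succ, List.map_append]
        simp only [List.map_cons, List.map_nil]
        congr 2
        omega
      rw [hrange, List.filter_append]
      by_cases hdvd : PySem.Int.mod n ((k : Int) + 1) == 0
      · have hdn : ((k : Int) + 1) ∣ n := by
          rw [← PySem.Int.mod_eq_zero_iff_dvd]; simpa using hdvd
        have h2 : (2 : Int) ∣ (k : Int) + 1 := by
          rw [← PySem.Int.mod_eq_zero_iff_dvd]; exact hmod2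
        have hf : List.filter (fun i => PySem.Int.mod n i == 0) [(k : Int) + 1] = [(k : Int) + 1] := by
          simp [PySem.Int.mod_eq_zero_iff_dvd, hdn]
        rw [hf, max?_append_singleton _ _ hbound]
        simp [getNparLoopA, PySem.Int.mod_eq_zero_iff_dvd, h2, hdn]
      · have hdn : ¬ ((k : Int) + 1) ∣ n := by
          rw [← PySem.Int.mod_eq_zero_iff_dvd]; simpa using hdvd
        have hf : List.filter (fun i => PySem.Int.mod n i == 0) [(k : Int) + 1] = [] := by
          simp [PySem.Int.mod_eq_zero_iff_dvd, hdn]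
        rw [hf, List.append_nil]
        simp only [getNparLoopA]
        rw [if_neg (by simp [PySem.Int.mod_eq_zero_iff_dvd, hdn])]
        exact ih
    · -- k+1 odd: nothing changes on either side
      have hdiv : (k + 1) / 2 = k / 2 := by omega
      have hmod2 : ¬ (PySem.Int.mod ((k : Int) + 1) 2 == 0) := by
        rw [PySem.Int.mod_eq_emod_of_pos (by norm_num)]
        simp only [beq_iff_eq]
        omega
      have hE : evensTo (k + 1) = evensTo k := by unfold evensTo; rw [hdiv]
      rw [hE]
      simp only [getNparLoopA, Bool.and_eq_true]
      rw [if_neg (fun h => hmod2 h.1)]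
      exact ih

-- ===== VERDICT (by name: the statement is the Claim_ definition above) =====
theorem get_npar_spec : Claim_equal_get_npar := by
  intro nproc _ _
  unfold Spec_get_npar get_npar get_npar_alt
  have hcast : ((Nat.sqrt nproc.toNat : Int) + 1) + 1 = ((Nat.sqrt nproc.toNat + 1 : Nat) : Int) + 1 := by
    push_cast; ring
  simp only [hcast, pyRange_two_even]
  exact loop_eq_collect nproc (Nat.sqrt nproc.toNat + 1)
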